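-- pv_equiv track=rewrite | github.com/serg6io4/ChessProject | Code/predecir2version.py | sumar_1_entre_piezas
-- ===== SOURCE A (Python) =====
-- def sumar_1_entre_piezas(cadena):
--     resultado = ""
--     suma_temporal = 0
--
--     for caracter in cadena:
--         if caracter.isdigit():
--             suma_temporal = suma_temporal * 10 + int(caracter)
--         else:
--             if suma_temporal > 0:
--                 resultado += str(suma_temporal)
--                 suma_temporal = 0
--             resultado += caracter
--
--     if suma_temporal > 0:
--         resultado += str(suma_temporal)
--
--     resultado = resultado.replace('1', '')  # Eliminamos todos los dígitos '1' restantes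
--
--     return resultado
-- ===== SOURCE B (Python) =====
-- def sumar_1_entre_piezas(cadena):
--     # Tokenize maximal digit runs in one forward scan, emit int(run) when > 0,
--     # collect pieces in a list and join once, then drop all '1' characters.
--     partes = []
--     i, n = 0, len(cadena)
--     while i < n:
--         if cadena[i].isdigit():
--             j = i
--             while j < n and cadena[j].isdigit():
--                 j += 1
--             valor = int(cadena[i:j])
--             if valor > 0:
--                 partes.append(str(valor))
--             i = j
--         else:
--             partes.append(cadena[i])
--             i += 1
--     return ''.join(partes).replace('1', '')
-- ===== Notes on version B (the rewrite author's own statement) =====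
-- stated objective: alternative
-- what changed: Replaces the per-character running-sum accumulator (state resultado/suma_temporal threaded through every character) by a run-at-a-time tokenizer: an index scan that slices each maximal digit run, converts it with int() once, emits it when positive, collects pieces in a list and joins once before the final replace('1','').
import Mathlib
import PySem

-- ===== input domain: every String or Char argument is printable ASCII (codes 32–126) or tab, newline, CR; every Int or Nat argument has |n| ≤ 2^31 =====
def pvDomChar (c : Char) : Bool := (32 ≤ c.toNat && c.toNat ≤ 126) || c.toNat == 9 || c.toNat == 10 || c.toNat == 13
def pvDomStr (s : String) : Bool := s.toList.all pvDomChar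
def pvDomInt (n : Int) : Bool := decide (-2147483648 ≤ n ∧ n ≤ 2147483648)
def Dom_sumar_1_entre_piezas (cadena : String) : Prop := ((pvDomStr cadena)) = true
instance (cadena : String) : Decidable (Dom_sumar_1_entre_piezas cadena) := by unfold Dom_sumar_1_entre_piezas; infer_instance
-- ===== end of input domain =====

-- B replaces A's per-character accumulator loop by a run-at-a-time tokenizer (same result, similar cost; equivalence of return values).


-- ===== PORT A =====
-- loop body of A: state = (resultado, suma_temporal).
-- int(caracter) under the isdigit guard is exact as c.toNat - 48 (PySem.Chars.isdigit is '0'..'9').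
def pvAStep (st : List Char × Int) (c : Char) : List Char × Int :=
  if PySem.Chars.isdigit c then
    (st.1, st.2 * 10 + ((c.toNat : Int) - 48))
  else
    ((if st.2 > 0 then st.1 ++ PySem.Int.toChars st.2 else st.1) ++ [c], 0)

-- A's trailing flush: "if suma_temporal > 0: resultado += str(suma_temporal)"
def pvAFlush (st : List Char × Int) : List Char :=
  if st.2 > 0 then st.1 ++ PySem.Int.toChars st.2 else st.1

def sumar_1_entre_piezas (cadena : String) : String :=
  PySem.Str.replace (String.ofList (pvAFlush (cadena.toList.foldl pvAStep ([], 0)))) "1" ""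

-- ===== PORT B =====
-- int(cadena[i:j]) on a nonempty all-digit slice (no sign/whitespace/underscore possible): exact as this fold.
def pvRunVal (ds : List Char) : Int :=
  ds.foldl (fun a c => a * 10 + ((c.toNat : Int) - 48)) 0

-- the outer while-loop of B: consume one maximal digit run, or one non-digit character
def pvBGo : List Char → List Char
  | [] => []
  | c :: rest =>
    if PySem.Chars.isdigit c then
      (if pvRunVal (c :: rest.takeWhile PySem.Chars.isdigit) > 0 then
        PySem.Int.toChars (pvRunVal (c :: rest.takeWhile PySem.Chars.isdigit)) else []) ++
      pvBGo (rest.dropWhile PySem.Chars.isdigit)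
    else
      c :: pvBGo rest
termination_by cs => cs.length
decreasing_by
  · have := List.length_dropWhile_le PySem.Chars.isdigit rest
    simp only [List.length_cons]
    omega
  · simp

def sumar_1_entre_piezas_alt (cadena : String) : String :=
  PySem.Str.replace (String.ofList (pvBGo cadena.toList)) "1" ""

-- ===== PRECONDITION & SPEC =====
def Spec_sumar_1_entre_piezas (cadena : String) (out : String) : Prop := out = sumar_1_entre_piezas_alt cadena
instance (cadena : String) (out : String) : Decidable (Spec_sumar_1_entre_piezas cadena out) := by unfold Spec_sumar_1_entre_piezas; infer_instance

-- ===== CLAIM (what is proved, stated in full; the proofs are below) =====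
def Claim_equal_sumar_1_entre_piezas : Prop := ∀ (cadena : String), Dom_sumar_1_entre_piezas cadena → Spec_sumar_1_entre_piezas cadena (sumar_1_entre_piezas cadena)

-- ===== LEMMAS AND PROOFS =====

-- folding A's step over an all-digit block only accumulates into suma_temporal
theorem pvA_fold_digits (ds : List Char) (hds : ∀ c ∈ ds, PySem.Chars.isdigit c) :
    ∀ (res : List Char) (s : Int),
      ds.foldl pvAStep (res, s) =
        (res, ds.foldl (fun a c => a * 10 + ((c.toNat : Int) - 48)) s) := by
  induction ds with
  | nil => intro res s; rfl
  | cons c rest ih =>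
    intro res s
    have hc : PySem.Chars.isdigit c := hds c (by simp)
    simp only [List.foldl_cons, pvAStep, hc, if_true]
    exact ih (fun x hx => hds x (by simp [hx])) res _

-- main invariant: flushing A's loop state equals res ++ B's output
theorem pvMain : ∀ (n : Nat) (cs : List Char), cs.length ≤ n → ∀ (res : List Char),
    pvAFlush (cs.foldl pvAStep (res, 0)) = res ++ pvBGo cs := by
  intro n
  induction n with
  | zero =>
    intro cs hcs res
    have h0 : cs = [] := List.eq_nil_of_length_eq_zero (Nat.le_zero.mp hcs)
    subst h0
    simp [pvBGo, pvAFlush]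
  | succ n ih =>
    intro cs hcs res
    match cs with
    | [] => simp [pvBGo, pvAFlush]
    | c :: rest =>
      by_cases hc : PySem.Chars.isdigit c
      · -- a maximal digit run starts here
        have hv : (c :: rest.takeWhile PySem.Chars.isdigit).foldl pvAStep (res, 0) =
            (res, pvRunVal (c :: rest.takeWhile PySem.Chars.isdigit)) :=
          pvA_fold_digits _ (by
            intro x hx
            rcases List.mem_cons.mp hx with h | h
            · simpa [h] using hc
            · exact List.mem_takeWhile_imp h) res 0
        have hfold : (c :: rest).foldl pvAStep (res, 0) =
            (rest.dropWhile PySem.Chars.isdigit).foldl pvAStep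
              (res, pvRunVal (c :: rest.takeWhile PySem.Chars.isdigit)) := by
          conv_lhs =>
            rw [show c :: rest =
              (c :: rest.takeWhile PySem.Chars.isdigit) ++ rest.dropWhile PySem.Chars.isdigit by
                simp [List.takeWhile_append_dropWhile]]
          rw [List.foldl_append, hv]
        have hB : pvBGo (c :: rest) =
            (if pvRunVal (c :: rest.takeWhile PySem.Chars.isdigit) > 0 then
              PySem.Int.toChars (pvRunVal (c :: rest.takeWhile PySem.Chars.isdigit)) else []) ++
            pvBGo (rest.dropWhile PySem.Chars.isdigit) := by
          rw [pvBGo]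
          simp [hc]
        rw [hB, hfold]
        generalize pvRunVal (c :: rest.takeWhile PySem.Chars.isdigit) = v
        cases hre : rest.dropWhile PySem.Chars.isdigit with
        | nil =>
          rw [List.foldl_nil]
          simp only [pvBGo, pvAFlush, List.append_nil]
          split <;> simp
        | cons d t =>
          have hd : PySem.Chars.isdigit d = false := by
            have hne : rest.dropWhile PySem.Chars.isdigit ≠ [] := by simp [hre]
            have := List.head_dropWhile_not PySem.Chars.isdigit hne
            rwa [show (rest.dropWhile PySem.Chars.isdigit).head hne = d by simp [hre]] at this
          have hstep : pvAStep (res, v) d =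
              ((if v > 0 then res ++ PySem.Int.toChars v else res) ++ [d], 0) := by
            simp [pvAStep, hd]
          have hlen : t.length ≤ n := by
            have h1 := List.length_dropWhile_le PySem.Chars.isdigit rest
            rw [hre] at h1
            simp only [List.length_cons] at h1 hcs
            omega
          rw [List.foldl_cons, hstep,
            ih t hlen ((if v > 0 then res ++ PySem.Int.toChars v else res) ++ [d])]
          have hBd : pvBGo (d :: t) = d :: pvBGo t := by
            rw [pvBGo]
            simp [hd]
          rw [hBd]
          split <;> simp
      · -- a single non-digit character
        have hstep : pvAStep (res, 0) c = (res ++ [c], 0) := by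
          simp [pvAStep, hc]
        have hBd : pvBGo (c :: rest) = c :: pvBGo rest := by
          rw [pvBGo]
          simp [hc]
        rw [List.foldl_cons, hstep, ih rest (by simpa using hcs) (res ++ [c]), hBd]
        simp

-- ===== VERDICT (by name: the statement is the Claim_ definition above) =====
theorem sumar_1_entre_piezas_spec : Claim_equal_sumar_1_entre_piezas := by
  intro cadena _
  unfold Spec_sumar_1_entre_piezas sumar_1_entre_piezas sumar_1_entre_piezas_alt
  have h := pvMain cadena.toList.length cadena.toList le_rfl []
  rw [List.nil_append] at h
  rw [h]
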